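-- pv_equiv track=rewrite | github.com/lotuscysgroup/Regulatory-Obligation-Graph---India-Startup-Compliance | rog/app/services/obligation_extractor.py | detect_penalty_text
-- ===== SOURCE A (Python) =====
-- PENALTY_KEYWORDS = ("penalty", "fine", "punishable", "liable to")
--
-- def detect_penalty_text(text: str) -> str | None:
--     lowered = text.lower()
--     first_idx: int | None = None
--     for key in PENALTY_KEYWORDS:
--         idx = lowered.find(key)
--         if idx == -1:
--             continue
--         if first_idx is None or idx < first_idx:
--             first_idx = idx
--     if first_idx is not None:
--         return text[first_idx:].strip()[:255]
--     return None
-- ===== SOURCE B (Python) =====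
-- PENALTY_KEYWORDS = ("penalty", "fine", "punishable", "liable to")
--
-- def detect_penalty_text(text: str) -> str | None:
--     lowered = text.lower()
--     # single left-to-right scan: the first position where any keyword starts
--     # is exactly the minimum of the four find() indices
--     for i in range(len(lowered)):
--         if lowered.startswith(PENALTY_KEYWORDS, i):
--             return text[i:].strip()[:255]
--     return None
-- ===== Notes on version B (the rewrite author's own statement) =====
-- stated objective: alternative
-- what changed: B replaces A's four separate full-text find() scans combined with a running minimum by a single left-to-right scan that returns at the first position where any keyword starts (the leftmost match).
import Mathlib
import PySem

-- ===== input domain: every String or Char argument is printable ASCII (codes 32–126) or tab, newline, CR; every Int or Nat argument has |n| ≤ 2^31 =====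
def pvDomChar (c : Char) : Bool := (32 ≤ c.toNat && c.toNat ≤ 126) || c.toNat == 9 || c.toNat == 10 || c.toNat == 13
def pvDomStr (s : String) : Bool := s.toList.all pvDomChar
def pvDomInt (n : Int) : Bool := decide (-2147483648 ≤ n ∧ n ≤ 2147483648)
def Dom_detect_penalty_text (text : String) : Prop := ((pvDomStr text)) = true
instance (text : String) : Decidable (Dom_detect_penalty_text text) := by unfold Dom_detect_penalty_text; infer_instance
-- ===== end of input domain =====

-- B replaces A's four separate find() scans combined with a running minimum by one
-- left-to-right scan returning the leftmost keyword-match position (objective: alternative).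

def PENALTY_KEYWORDS : List String := ["penalty", "fine", "punishable", "liable to"]

-- ===== PORT A =====
-- loop body of A's 'for key in PENALTY_KEYWORDS' (named so the fold lemmas can cite it)
def pvStepA (lowered : String) (acc : Option Int) (key : String) : Option Int :=
  let idx := PySem.Str.find lowered key
  if idx = -1 then acc
  else
    match acc with
    | none => some idx
    | some f => if idx < f then some idx else some f

def detect_penalty_text (text : String) : Option String :=
  let lowered := PySem.Str.lower text
  let first_idx := PENALTY_KEYWORDS.foldl (pvStepA lowered) none
  match first_idx with
  | some f => some (PySem.Str.slice (PySem.Str.strip (PySem.Str.slice text (some f) none)) none (some 255))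
  | none => none

-- ===== PORT B =====
-- 'lowered.startswith(PENALTY_KEYWORDS, i)' : exact — startswith with a start offset tries
-- each keyword of the tuple as a prefix of the text from position i on
def pvHitB (lowered : String) (i : Nat) : Bool :=
  PENALTY_KEYWORDS.any (fun k => PySem.Chars.startswith (lowered.toList.drop i) k.toList)

-- 'for i in range(len(lowered)): …' of Source B, entered at index i
def pvLoopB (text lowered : String) (i : Nat) : Option String :=
  if h : i < lowered.toList.length then
    if pvHitB lowered i then
      some (PySem.Str.slice (PySem.Str.strip (PySem.Str.slice text (some (i : Int)) none)) none (some 255))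
    else pvLoopB text lowered (i + 1)
  else none
termination_by lowered.toList.length - i
decreasing_by simp only [String.length_toList] at h ⊢; omega

def detect_penalty_text_alt (text : String) : Option String :=
  pvLoopB text (PySem.Str.lower text) 0

-- ===== PRECONDITION & SPEC =====
def Spec_detect_penalty_text (text : String) (out : Option String) : Prop := out = detect_penalty_text_alt text
instance (text : String) (out : Option String) : Decidable (Spec_detect_penalty_text text out) := by unfold Spec_detect_penalty_text; infer_instance

-- ===== CLAIM (what is proved, stated in full; the proofs are below) =====
def Claim_equal_detect_penalty_text : Prop := ∀ (text : String), Dom_detect_penalty_text text → Spec_detect_penalty_text text (detect_penalty_text text)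

-- ===== LEMMAS AND PROOFS =====

-- option-minimum (none = "no match yet")
def pvOmin : Option Int → Option Int → Option Int
  | none, b => b
  | some a, none => some a
  | some a, some b => some (min a b)

-- the minimum of the (non-(-1)) find results over a key list
def pvListMin (lowered : String) : List String → Option Int
  | [] => none
  | k :: ks =>
      pvOmin (if PySem.Str.find lowered k = -1 then none else some (PySem.Str.find lowered k))
             (pvListMin lowered ks)

-- Str-level restatements of the Chars find lemmas (s a variable, so nothing else rewrites)
theorem pvStrFind_neg_one_le (s k : String) : -1 ≤ PySem.Str.find s k := by
  simpa [PySem.Str.find_eq] using PySem.Chars.neg_one_le_find (s := s.toList) (sub := k.toList)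

theorem pvStrFind_spec (s k : String) (h : 0 ≤ PySem.Str.find s k) :
    k.toList <+: s.toList.drop (PySem.Str.find s k).toNat ∧
    ∀ i < (PySem.Str.find s k).toNat, ¬ k.toList <+: s.toList.drop i := by
  have h' : 0 ≤ PySem.Chars.find s.toList k.toList := by simpa [PySem.Str.find_eq] using h
  have := PySem.Chars.find_spec (s := s.toList) (sub := k.toList) h'
  simpa [PySem.Str.find_eq] using this

theorem pvOmin_assoc (a b c : Option Int) : pvOmin (pvOmin a b) c = pvOmin a (pvOmin b c) := by
  cases a <;> cases b <;> cases c <;> simp [pvOmin, min_assoc]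

theorem pvStepA_eq (lowered : String) (acc : Option Int) (k : String) :
    pvStepA lowered acc k =
      pvOmin acc (if PySem.Str.find lowered k = -1 then none else some (PySem.Str.find lowered k)) := by
  cases acc with
  | none => rfl
  | some f =>
      show (if PySem.Str.find lowered k = -1 then some f
            else if PySem.Str.find lowered k < f then some (PySem.Str.find lowered k) else some f) = _
      by_cases hc : PySem.Str.find lowered k = -1
      · rw [if_pos hc, if_pos hc]; rfl
      · rw [if_neg hc, if_neg hc]
        show _ = some (min f (PySem.Str.find lowered k))
        by_cases hlt : PySem.Str.find lowered k < f
        · rw [if_pos hlt, min_eq_right (le_of_lt hlt)]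
        · rw [if_neg hlt, min_eq_left (by omega)]

theorem pvFoldA_eq (lowered : String) (ks : List String) (acc : Option Int) :
    ks.foldl (pvStepA lowered) acc = pvOmin acc (pvListMin lowered ks) := by
  induction ks generalizing acc with
  | nil => cases acc <;> simp [pvListMin, pvOmin]
  | cons k ks ih =>
      simp only [List.foldl_cons, pvListMin, ih, pvStepA_eq, pvOmin_assoc]

theorem pvListMin_none (lowered : String) (ks : List String)
    (h : pvListMin lowered ks = none) : ∀ k ∈ ks, PySem.Str.find lowered k = -1 := by
  induction ks with
  | nil => simp
  | cons k ks ih =>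
      intro k' hk'
      simp only [pvListMin] at h
      by_cases hk : PySem.Str.find lowered k = -1
      · rw [if_pos hk] at h
        simp only [pvOmin] at h
        rcases List.mem_cons.mp hk' with rfl | hk'
        · exact hk
        · exact ih h k' hk'
      · rw [if_neg hk] at h
        cases hmin : pvListMin lowered ks <;> rw [hmin] at h <;> simp [pvOmin] at h

theorem pvListMin_some (lowered : String) (ks : List String) (v : Int)
    (h : pvListMin lowered ks = some v) :
    (∃ k ∈ ks, PySem.Str.find lowered k = v) ∧
    (∀ k ∈ ks, PySem.Str.find lowered k = -1 ∨ v ≤ PySem.Str.find lowered k) ∧ 0 ≤ v := by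
  induction ks generalizing v with
  | nil => simp [pvListMin] at h
  | cons k ks ih =>
      simp only [pvListMin] at h
      by_cases hk : PySem.Str.find lowered k = -1
      · rw [if_pos hk] at h
        simp only [pvOmin] at h
        obtain ⟨⟨k', hk', hfk'⟩, hall, hv⟩ := ih v h
        refine ⟨⟨k', List.mem_cons_of_mem _ hk', hfk'⟩, ?_, hv⟩
        intro k'' hk''
        rcases List.mem_cons.mp hk'' with rfl | hk''
        · exact Or.inl hk
        · exact hall k'' hk''
      · rw [if_neg hk] at h
        have hk0 : 0 ≤ PySem.Str.find lowered k := by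
          have := pvStrFind_neg_one_le lowered k; omega
        cases hmin : pvListMin lowered ks with
        | none =>
            rw [hmin, pvOmin] at h
            cases h
            refine ⟨⟨k, List.mem_cons_self, rfl⟩, ?_, hk0⟩
            intro k'' hk''
            rcases List.mem_cons.mp hk'' with rfl | hk''
            · exact Or.inr le_rfl
            · exact Or.inl (pvListMin_none lowered ks hmin k'' hk'')
        | some w =>
            rw [hmin] at h
            simp only [pvOmin] at h
            obtain ⟨⟨k', hk', hfk'⟩, hall, hw⟩ := ih w hmin
            cases h
            have hmain : ∀ k'' ∈ (k :: ks),
                PySem.Str.find lowered k'' = -1 ∨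
                min (PySem.Str.find lowered k) w ≤ PySem.Str.find lowered k'' := by
              intro k'' hk''
              rcases List.mem_cons.mp hk'' with rfl | hk''
              · exact Or.inr (min_le_left _ _)
              · rcases hall k'' hk'' with h1 | h1
                · exact Or.inl h1
                · exact Or.inr (le_trans (min_le_right _ _) h1)
            by_cases hle : PySem.Str.find lowered k ≤ w
            · exact ⟨⟨k, List.mem_cons_self, (min_eq_left hle).symm⟩, hmain, le_min hk0 hw⟩
            · exact ⟨⟨k', List.mem_cons_of_mem _ hk',
                by rw [hfk']; exact (min_eq_right (le_of_not_ge hle)).symm⟩, hmain, le_min hk0 hw⟩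

-- pvHitB at i ↔ some keyword is a prefix of lowered.toList.drop i
theorem pvHitB_iff (lowered : String) (i : Nat) :
    pvHitB lowered i = true ↔ ∃ k ∈ PENALTY_KEYWORDS, k.toList <+: lowered.toList.drop i := by
  simp [pvHitB, List.any_eq_true, PySem.Chars.startswith_iff]

-- a keyword occurring at i means its find is ≥ 0 and ≤ i
theorem pvFind_le_of_prefix (lowered k : String) (i : Nat)
    (h : k.toList <+: lowered.toList.drop i) :
    0 ≤ PySem.Str.find lowered k ∧ (PySem.Str.find lowered k).toNat ≤ i := by
  have hin : PySem.Chars.isIn k.toList lowered.toList = true :=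
    (PySem.Chars.exists_prefix_drop_iff_isIn (sub := k.toList) (s := lowered.toList)).mp ⟨i, h⟩
  have hinf : k.toList <:+: lowered.toList := (PySem.Chars.isIn_iff_infix _ _).mp hin
  have hnn : 0 ≤ PySem.Str.find lowered k := by
    simpa [PySem.Str.find_eq] using (PySem.Chars.find_nonneg_iff _ _).mpr hinf
  refine ⟨hnn, ?_⟩
  by_contra hlt
  exact (pvStrFind_spec lowered k hnn).2 i (by omega) h

theorem pvLoopB_none (text lowered : String) (i : Nat)
    (h : ∀ j, i ≤ j → pvHitB lowered j = false) :
    pvLoopB text lowered i = none := by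
  by_cases hi : i < lowered.toList.length
  · rw [pvLoopB, dif_pos hi, h i le_rfl]
    simp only [Bool.false_eq_true, if_false]
    exact pvLoopB_none text lowered (i + 1) (fun j hj => h j (by omega))
  · rw [pvLoopB, dif_neg hi]
termination_by lowered.toList.length - i
decreasing_by simp only [String.length_toList] at *; omega

theorem pvLoopB_some (text lowered : String) (i m : Nat)
    (hge : i ≤ m) (hlt : m < lowered.toList.length) (hhit : pvHitB lowered m = true)
    (hmin : ∀ j, i ≤ j → j < m → pvHitB lowered j = false) :
    pvLoopB text lowered i =
      some (PySem.Str.slice (PySem.Str.strip (PySem.Str.slice text (some (m : Int)) none)) none (some 255)) := by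
  rw [pvLoopB]
  rcases eq_or_lt_of_le hge with rfl | hlt'
  · rw [dif_pos hlt, if_pos hhit]
  · rw [dif_pos (by omega), hmin i le_rfl hlt']
    simp only [Bool.false_eq_true, if_false]
    exact pvLoopB_some text lowered (i + 1) m (by omega) hlt hhit (fun j hj1 hj2 => hmin j (by omega) hj2)
termination_by lowered.toList.length - i
decreasing_by simp only [String.length_toList] at *; omega

-- every keyword is a nonempty string
theorem pvKeys_ne_nil : ∀ k ∈ PENALTY_KEYWORDS, k.toList ≠ [] := by decide

-- ===== VERDICT (by name: the statement is the Claim_ definition above) =====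
theorem detect_penalty_text_spec : Claim_equal_detect_penalty_text := by
  intro text _
  unfold Spec_detect_penalty_text
  cases hmin : pvListMin (PySem.Str.lower text) PENALTY_KEYWORDS with
  | none =>
      have hall := pvListMin_none (PySem.Str.lower text) PENALTY_KEYWORDS hmin
      simp only [detect_penalty_text, detect_penalty_text_alt, pvFoldA_eq, hmin, pvOmin]
      rw [pvLoopB_none]
      intro j _
      by_contra hj
      obtain ⟨k, hk, hpre⟩ := (pvHitB_iff (PySem.Str.lower text) j).mp (by simpa using hj)
      have := pvFind_le_of_prefix (PySem.Str.lower text) k j hpre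
      rw [hall k hk] at this
      omega
  | some v =>
      obtain ⟨⟨k, hk, hfk⟩, hall, hnn⟩ := pvListMin_some (PySem.Str.lower text) PENALTY_KEYWORDS v hmin
      have hspec := pvStrFind_spec (PySem.Str.lower text) k (by rw [hfk]; exact hnn)
      rw [hfk] at hspec
      have hmv : ((v.toNat : Nat) : Int) = v := Int.toNat_of_nonneg hnn
      have hprem : k.toList <+: (PySem.Str.lower text).toList.drop v.toNat := hspec.1
      have hmlt : v.toNat < (PySem.Str.lower text).toList.length := by
        rcases hprem with ⟨t, ht⟩
        have hkne := pvKeys_ne_nil k hk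
        by_contra hge
        rw [List.drop_eq_nil_of_le (by omega)] at ht
        cases hkl : k.toList <;> simp_all
      have hhit : pvHitB (PySem.Str.lower text) v.toNat = true :=
        (pvHitB_iff (PySem.Str.lower text) v.toNat).mpr ⟨k, hk, hprem⟩
      have hminimal : ∀ j, 0 ≤ j → j < v.toNat → pvHitB (PySem.Str.lower text) j = false := by
        intro j _ hj
        by_contra hc
        obtain ⟨k', hk', hpre'⟩ := (pvHitB_iff (PySem.Str.lower text) j).mp (by simpa using hc)
        obtain ⟨hnn', hle'⟩ := pvFind_le_of_prefix (PySem.Str.lower text) k' j hpre'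
        rcases hall k' hk' with h1 | h1 <;> omega
      simp only [detect_penalty_text, detect_penalty_text_alt, pvFoldA_eq, hmin, pvOmin]
      rw [pvLoopB_some text (PySem.Str.lower text) 0 v.toNat (Nat.zero_le _) hmlt hhit hminimal, hmv]
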